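-- pv_equiv track=rewrite | github.com/danoneata/xts | www_crops.py | find_word_id
-- ===== SOURCE A (Python) =====
-- def find_word_id(lexicon, text, phones, phone_id):
--     lengths = [len(lexicon[word]) for word in text.split()]
--     i = phone_id - sum(p in ("SIL", "HH") for p in phones[:phone_id])
--     word_id = 0
--     while True:
--         if i - lengths[word_id] < 0:
--             break
--         i -= lengths[word_id]
--         word_id += 1
--     return word_id
-- ===== SOURCE B (Python) =====
-- def find_word_id(lexicon, text, phones, phone_id):
--     i = phone_id - sum(p in ("SIL", "HH") for p in phones[:phone_id])
--     cum = []
--     total = 0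
--     for word in text.split():
--         total += len(lexicon[word])
--         cum.append(total)
--     return sum(1 for c in cum if c <= i)
-- ===== Notes on version B (the rewrite author's own statement) =====
-- stated objective: alternative
-- what changed: Replaces A's destructive subtract-until-negative while-loop over word lengths by a single pass building the cumulative phone counts and then counting how many cumulative counts are <= the adjusted phone index.
import Mathlib
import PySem

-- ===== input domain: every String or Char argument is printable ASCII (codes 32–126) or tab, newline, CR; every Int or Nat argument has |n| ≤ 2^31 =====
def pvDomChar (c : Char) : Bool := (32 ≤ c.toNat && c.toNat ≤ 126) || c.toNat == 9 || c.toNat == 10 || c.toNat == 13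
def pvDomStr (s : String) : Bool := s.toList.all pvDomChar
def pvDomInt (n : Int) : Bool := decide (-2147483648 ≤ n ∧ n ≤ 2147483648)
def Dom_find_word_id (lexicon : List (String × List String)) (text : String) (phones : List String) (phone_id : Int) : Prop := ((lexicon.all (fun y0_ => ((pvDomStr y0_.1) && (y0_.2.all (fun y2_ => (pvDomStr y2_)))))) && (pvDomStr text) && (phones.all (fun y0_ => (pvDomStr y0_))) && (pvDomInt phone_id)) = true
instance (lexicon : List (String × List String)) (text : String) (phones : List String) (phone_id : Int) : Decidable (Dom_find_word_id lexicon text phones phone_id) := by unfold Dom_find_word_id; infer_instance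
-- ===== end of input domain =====

-- B replaces A's destructive subtract-until-negative loop by a single pass building the
-- cumulative phone counts and then counting how many of them are ≤ the adjusted index
-- (objective: alternative/simpler structure, same cost).

-- shared helper: the adjusted phone index  i = phone_id - sum(p in ("SIL","HH") for p in phones[:phone_id])
def pvOffset (phones : List String) (phone_id : Int) : Int :=
  phone_id - ((PySem.List.slice phones none (some phone_id)).countP
    (fun p => p == "SIL" || p == "HH") : Int)

-- shared helper: [len(lexicon[word]) for word in text.split()]  (missing word → 0; Pre_ excludes that)
def pvLens (lexicon : List (String × List String)) (text : String) : List Int :=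
  (PySem.Str.split₀ text).map (fun w => (((lexicon.lookup w).getD []).length : Int))

-- ===== PORT A =====
-- the while-loop: walks the lengths list, subtracting, until i - lengths[word_id] < 0
def pvLoopA : List Int → Int → Int → Int
  | [], _, word_id => word_id            -- Python raises IndexError here; Pre_ excludes it
  | l :: rest, i, word_id => if i - l < 0 then word_id else pvLoopA rest (i - l) (word_id + 1)

def find_word_id (lexicon : List (String × List String)) (text : String) (phones : List String) (phone_id : Int) : Int :=
  let lengths := pvLens lexicon text
  let i := pvOffset phones phone_id
  pvLoopA lengths i 0

-- ===== PORT B =====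
def find_word_id_alt (lexicon : List (String × List String)) (text : String) (phones : List String) (phone_id : Int) : Int :=
  let i := pvOffset phones phone_id
  let cum := ((PySem.Str.split₀ text).foldl
      (fun (acc : List Int × Int) w =>
        let total := acc.2 + (((lexicon.lookup w).getD []).length : Int)
        (acc.1 ++ [total], total)) (([] : List Int), 0)).1
  cum.foldl (fun s c => if c ≤ i then s + 1 else s) 0

-- ===== PRECONDITION & SPEC =====
-- Pre_ excludes exactly the inputs where A raises: a word of text missing from lexicon
-- (KeyError) and an adjusted index that runs past the word lengths, or an empty word list
-- (IndexError) — i.e. the word lengths are empty or the adjusted index is ≥ their sum.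
def Pre_find_word_id (lexicon : List (String × List String)) (text : String) (phones : List String) (phone_id : Int) : Prop :=
  (∀ w ∈ PySem.Str.split₀ text, (lexicon.lookup w).isSome = true) ∧
  pvLens lexicon text ≠ [] ∧
  pvOffset phones phone_id < (pvLens lexicon text).sum
instance (lexicon : List (String × List String)) (text : String) (phones : List String) (phone_id : Int) : Decidable (Pre_find_word_id lexicon text phones phone_id) := by unfold Pre_find_word_id; infer_instance

def pvWitness_find_word_id : (List (String × List String)) × String × List String × Int :=
  ([("a", ["AH"]), ("bee", ["B", "IY"])], "a bee", ["SIL", "AH", "B", "IY"], 2)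

def Spec_find_word_id (lexicon : List (String × List String)) (text : String) (phones : List String) (phone_id : Int) (out : Int) : Prop := out = find_word_id_alt lexicon text phones phone_id
instance (lexicon : List (String × List String)) (text : String) (phones : List String) (phone_id : Int) (out : Int) : Decidable (Spec_find_word_id lexicon text phones phone_id out) := by unfold Spec_find_word_id; infer_instance

-- ===== CLAIM (what is proved, stated in full; the proofs are below) =====
def Claim_equal_find_word_id : Prop := ∀ (lexicon : List (String × List String)) (text : String) (phones : List String) (phone_id : Int), Dom_find_word_id lexicon text phones phone_id → Pre_find_word_id lexicon text phones phone_id → Spec_find_word_id lexicon text phones phone_id (find_word_id lexicon text phones phone_id)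


-- ===== LEMMAS AND PROOFS =====

-- number of prefixes of lens whose running sum is ≤ i (recursively, in shifted form)
def pvCnt : List Int → Int → Int
  | [], _ => 0
  | l :: r, i => (if l ≤ i then 1 else 0) + pvCnt r (i - l)

-- the running sums produced by B's building loop, started at total = t
def pvScan : Int → List Int → List Int
  | _, [] => []
  | t, l :: r => (t + l) :: pvScan (t + l) r

theorem pvCnt_neg : ∀ (lens : List Int) (i : Int), (∀ l ∈ lens, 0 ≤ l) → i < 0 → pvCnt lens i = 0 := by
  intro lens
  induction lens with
  | nil => intro i _ _; rfl
  | cons l r ih =>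
    intro i h hi
    have hl : 0 ≤ l := h l (by simp)
    have : pvCnt r (i - l) = 0 := ih (i - l) (fun x hx => h x (by simp [hx])) (by omega)
    simp only [pvCnt, this, add_zero]
    omega

theorem pvLoopA_eq_cnt : ∀ (lens : List Int) (i wid : Int), (∀ l ∈ lens, 0 ≤ l) → i < lens.sum → pvLoopA lens i wid = wid + pvCnt lens i := by
  intro lens
  induction lens with
  | nil => intro i wid _ hi; simp [pvLoopA, pvCnt]
  | cons l r ih =>
    intro i wid h hi
    have hl : 0 ≤ l := h l (by simp)
    by_cases hc : i - l < 0
    · have : pvCnt r (i - l) = 0 := pvCnt_neg r (i - l) (fun x hx => h x (by simp [hx])) hc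
      simp only [pvLoopA, if_pos hc, pvCnt, this, add_zero]
      omega
    · have hsum : (l :: r).sum = l + r.sum := by simp
      have := ih (i - l) (wid + 1) (fun x hx => h x (by simp [hx])) (by rw [hsum] at hi; omega)
      simp only [pvLoopA, if_neg hc, pvCnt, this]
      omega

theorem pvBuild_eq_scan : ∀ (lens : List Int) (acc : List Int) (t : Int),
    lens.foldl (fun (acc : List Int × Int) l => (acc.1 ++ [acc.2 + l], acc.2 + l)) (acc, t)
      = (acc ++ pvScan t lens, t + lens.sum) := by
  intro lens
  induction lens with
  | nil => intro acc t; simp [pvScan]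
  | cons l r ih =>
    intro acc t
    simp only [List.foldl_cons, ih, pvScan, List.sum_cons, Prod.mk.injEq]
    exact ⟨by simp [List.append_assoc], by omega⟩

theorem pvCnt_scan : ∀ (lens : List Int) (t i : Int),
    ((pvScan t lens).countP (fun c => decide (c ≤ i)) : Int) = pvCnt lens (i - t) := by
  intro lens
  induction lens with
  | nil => intro t i; simp [pvScan, pvCnt]
  | cons l r ih =>
    intro t i
    by_cases hc : t + l ≤ i
    all_goals
      have heq : i - (t + l) = i - t - l := by omega
      simp only [pvScan, List.countP_cons, pvCnt, decide_eq_true_eq]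
      push_cast
      rw [ih (t + l) i, heq]
      split_ifs <;> omega

theorem pvLens_nonneg (lexicon : List (String × List String)) (text : String) :
    ∀ l ∈ pvLens lexicon text, 0 ≤ l := by
  intro l hl
  unfold pvLens at hl
  simp only [List.mem_map] at hl
  obtain ⟨w, _, rfl⟩ := hl
  exact Int.natCast_nonneg _

-- ===== VERDICT (by name: the statement is the Claim_ definition above) =====
theorem find_word_id_spec : Claim_equal_find_word_id := by
  intro lexicon text phones phone_id _ hpre
  obtain ⟨_, _, hlt⟩ := hpre
  unfold Spec_find_word_id find_word_id find_word_id_alt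
  have hbuild := pvBuild_eq_scan (pvLens lexicon text) [] 0
  have hfoldmap : (PySem.Str.split₀ text).foldl
      (fun (acc : List Int × Int) w =>
        (acc.1 ++ [acc.2 + (((lexicon.lookup w).getD []).length : Int)],
         acc.2 + (((lexicon.lookup w).getD []).length : Int))) (([] : List Int), 0)
      = (pvLens lexicon text).foldl
        (fun (acc : List Int × Int) l => (acc.1 ++ [acc.2 + l], acc.2 + l)) (([] : List Int), 0) := by
    unfold pvLens
    rw [List.foldl_map]
  simp only []
  rw [hfoldmap, hbuild]
  simp only [List.nil_append]
  rw [PySem.List.foldl_ite_add_one]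
  rw [pvCnt_scan]
  rw [pvLoopA_eq_cnt (pvLens lexicon text) (pvOffset phones phone_id) 0
        (pvLens_nonneg lexicon text) hlt]
  simp
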